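-- pv_equiv track=rewrite | github.com/Achituv9/WikiEmbed-Exploring-Semantic-Connections-with-BERT-and-K-Means | most_common_categories_network.py | extract_text_and_categories
-- ===== SOURCE A (Python) =====
-- def extract_text_and_categories(article_text):
--     """
--     Given the full article text, split off the 'Category:' portion if present.
--     Returns:
--       (cleaned_text, categories_list)
--     """
--     # Find the first occurrence of "Category:"
--     cat_index = article_text.find("Category:")
--     if cat_index == -1:
--         # No 'Category:' found
--         return article_text, []
--
--     # Text up to (but not including) 'Category:'
--     cleaned_text = article_text[:cat_index]
--
--     # The chunk that starts from the first 'Category:'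
--     categories_text = article_text[cat_index:]
--
--     # Split by "Category:" to isolate category strings
--     split_categories = categories_text.split("Category:")
--
--     # Extract non-empty stripped items
--     cat_list = [c.strip() for c in split_categories if c.strip()]
--
--     return cleaned_text, cat_list
-- ===== SOURCE B (Python) =====
-- def extract_text_and_categories(article_text):
--     """
--     Given the full article text, split off the 'Category:' portion if present.
--     Returns:
--       (cleaned_text, categories_list)
--     """
--     sep = "Category:"
--     segments = []
--     buf = []
--     i = 0
--     n = len(article_text)
--     while i < n:
--         if article_text.startswith(sep, i):
--             segments.append("".join(buf))
--             buf = []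
--             i += len(sep)
--         else:
--             buf.append(article_text[i])
--             i += 1
--     segments.append("".join(buf))
--     cats = []
--     for seg in segments[1:]:
--         t = seg.strip()
--         if t:
--             cats.append(t)
--     return segments[0], cats
-- ===== Notes on version B (the rewrite author's own statement) =====
-- stated objective: alternative
-- what changed: Replaces A's find / -1-guard / two slices / library str.split pipeline with a single explicit character-by-character scanner loop that maintains a buffer and a segment accumulator, detecting 'Category:' occurrences itself via startswith at each position.
import Mathlib
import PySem

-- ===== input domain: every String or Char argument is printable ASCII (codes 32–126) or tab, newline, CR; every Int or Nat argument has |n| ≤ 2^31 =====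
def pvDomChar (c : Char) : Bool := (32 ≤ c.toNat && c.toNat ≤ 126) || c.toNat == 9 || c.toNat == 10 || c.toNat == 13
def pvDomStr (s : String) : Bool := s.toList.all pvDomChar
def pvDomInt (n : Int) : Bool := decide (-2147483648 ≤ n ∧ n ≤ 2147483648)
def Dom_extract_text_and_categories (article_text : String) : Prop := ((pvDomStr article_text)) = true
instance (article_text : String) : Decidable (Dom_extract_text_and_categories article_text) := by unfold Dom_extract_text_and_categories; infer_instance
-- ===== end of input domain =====

-- B replaces A's find / -1-guard / two slices / str.split pipeline with one explicit
-- character-by-character scanner loop (buffer + segment accumulator) that detects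
-- "Category:" itself (objective: alternative); return values are proved equal on all inputs.

-- ===== PORT A =====
def extract_text_and_categories (article_text : String) : String × List String :=
  let cat_index := PySem.Str.find article_text "Category:"
  if cat_index = -1 then (article_text, [])
  else
    let cleaned_text := PySem.Str.slice article_text none (some cat_index)
    let categories_text := PySem.Str.slice article_text (some cat_index) none
    let split_categories := (PySem.Str.split? categories_text "Category:").getD []
    let cat_list := split_categories.filterMap
      (fun c => if PySem.Str.strip c ≠ "" then some (PySem.Str.strip c) else none)
    (cleaned_text, cat_list)

-- ===== PORT B =====
-- B's while-loop over positions: consume the remaining characters; on a "Category:"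
-- prefix close the buffer into a new segment and skip 9 chars, else move one char
-- into the buffer. Transliterated as the obvious structural recursion on List Char.
def pvScanGo : List Char → List Char → List (List Char) → List (List Char)
  | [], buf, segs => segs ++ [buf]
  | c :: rest, buf, segs =>
    if ("Category:".toList).isPrefixOf (c :: rest) then
      pvScanGo (List.drop 8 rest) [] (segs ++ [buf])
    else
      pvScanGo rest (buf ++ [c]) segs
termination_by l _ _ => l.length
decreasing_by
  · simp only [List.length_drop, List.length_cons]; omega
  · simp

def extract_text_and_categories_alt (article_text : String) : String × List String :=
  let segments := pvScanGo article_text.toList [] []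
  (String.ofList (segments.headD []),
   (segments.drop 1).filterMap
     (fun seg =>
       let t := PySem.Str.strip (String.ofList seg)
       if t ≠ "" then some t else none))

-- ===== PRECONDITION & SPEC =====
def Spec_extract_text_and_categories (article_text : String) (out : String × List String) : Prop := out = extract_text_and_categories_alt article_text
instance (article_text : String) (out : String × List String) : Decidable (Spec_extract_text_and_categories article_text out) := by unfold Spec_extract_text_and_categories; infer_instance

-- ===== CLAIM (what is proved, stated in full; the proofs are below) =====
def Claim_equal_extract_text_and_categories : Prop := ∀ (article_text : String), Dom_extract_text_and_categories article_text → Spec_extract_text_and_categories article_text (extract_text_and_categories article_text)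

-- ===== LEMMAS AND PROOFS =====

-- 'pvMapHd p' prepends p to the first block of a split (the accumulator shape of splitOn.go)
def pvMapHd (p : List Char) : List (List Char) → List (List Char)
  | [] => [p]
  | x :: xs => (p ++ x) :: xs

theorem pvMapHd_pvMapHd (p q : List Char) (xs : List (List Char)) :
    pvMapHd p (pvMapHd q xs) = pvMapHd (p ++ q) xs := by
  cases xs <;> simp [pvMapHd]

theorem pvMapHd_ne_nil (p : List Char) (xs : List (List Char)) : pvMapHd p xs ≠ [] := by
  cases xs <;> simp [pvMapHd]

theorem pv_go_nil (sep : List Char) (fuel : Nat) (cur : List Char) (acc : List (List Char)) :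
    PySem.Chars.splitOn.go sep fuel [] cur acc = (cur.reverse :: acc).reverse := by
  cases fuel <;> simp [PySem.Chars.splitOn.go]

theorem pv_go_cons (sep : List Char) (fuel : Nat) (c : Char) (rest cur : List Char) (acc : List (List Char)) :
    PySem.Chars.splitOn.go sep (fuel + 1) (c :: rest) cur acc =
      if sep.isPrefixOf (c :: rest) = true then
        PySem.Chars.splitOn.go sep fuel (List.drop sep.length (c :: rest)) [] (cur.reverse :: acc)
      else PySem.Chars.splitOn.go sep fuel rest (c :: cur) acc := by
  rw [PySem.Chars.splitOn.go.eq_def]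

-- accumulator lemma: go with any sufficient fuel is the canonical split with cur/acc folded in
theorem pv_go_acc (sep : List Char) (hsep : sep ≠ []) :
    ∀ fuel l cur acc, l.length < fuel →
      PySem.Chars.splitOn.go sep fuel l cur acc =
        acc.reverse ++ pvMapHd cur.reverse (PySem.Chars.splitOn.go sep (l.length + 1) l [] []) := by
  intro fuel
  induction fuel using Nat.strong_induction_on with
  | _ fuel IH =>
    intro l cur acc hlt
    match fuel, l with
    | fuel + 1, [] => simp [pv_go_nil, pvMapHd]
    | fuel + 1, c :: rest =>
      have hlt' : rest.length + 1 < fuel + 1 := by simpa using hlt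
      rw [pv_go_cons]
      by_cases hpre : sep.isPrefixOf (c :: rest) = true
      · have hsl : 1 ≤ sep.length := by
          cases sep with
          | nil => exact absurd rfl hsep
          | cons a t => simp
        have hlen : (List.drop sep.length (c :: rest)).length = rest.length + 1 - sep.length := by
          rw [List.length_drop, List.length_cons]
        have hdl : (List.drop sep.length (c :: rest)).length < fuel := by omega
        have hdl2 : (List.drop sep.length (c :: rest)).length < rest.length + 1 := by omega
        rw [if_pos hpre, IH fuel (by omega) _ _ _ hdl]
        have hR : PySem.Chars.splitOn.go sep ((c :: rest).length + 1) (c :: rest) [] [] =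
            [] :: pvMapHd [] (PySem.Chars.splitOn.go sep
              ((List.drop sep.length (c :: rest)).length + 1) (List.drop sep.length (c :: rest)) [] []) := by
          simp only [List.length_cons]
          rw [pv_go_cons, if_pos hpre, IH (rest.length + 1) (by omega) _ _ _ hdl2]
          simp [pvMapHd]
        rw [hR]
        simp [pvMapHd]
      · rw [if_neg hpre, IH fuel (by omega) _ _ _ (by omega)]
        have hR : PySem.Chars.splitOn.go sep ((c :: rest).length + 1) (c :: rest) [] [] =
            pvMapHd [c] (PySem.Chars.splitOn.go sep (rest.length + 1) rest [] []) := by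
          simp only [List.length_cons]
          rw [pv_go_cons, if_neg hpre, IH (rest.length + 1) (by omega) _ _ _ (by omega)]
          simp [pvMapHd]
        rw [hR, pvMapHd_pvMapHd]
        simp

theorem pv_splitOn_nil (sep : List Char) : PySem.Chars.splitOn [] sep = [[]] := by
  simp [PySem.Chars.splitOn, pv_go_nil]

theorem pv_splitOn_cons_neg (sep : List Char) (hsep : sep ≠ []) (c : Char) (rest : List Char)
    (hpre : sep.isPrefixOf (c :: rest) = false) :
    PySem.Chars.splitOn (c :: rest) sep = pvMapHd [c] (PySem.Chars.splitOn rest sep) := by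
  simp only [PySem.Chars.splitOn, List.length_cons]
  rw [pv_go_cons, if_neg (by simp [hpre]),
    pv_go_acc sep hsep (rest.length + 1) rest [c] [] (by omega)]
  simp [pvMapHd]

theorem pv_splitOn_ne_nil (sep : List Char) (hsep : sep ≠ []) (l : List Char) :
    PySem.Chars.splitOn l sep ≠ [] := by
  cases l with
  | nil => simp [pv_splitOn_nil]
  | cons c rest =>
    by_cases hpre : sep.isPrefixOf (c :: rest) = true
    · simp only [PySem.Chars.splitOn, List.length_cons]
      rw [pv_go_cons, if_pos hpre]
      simp only [List.reverse_nil]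
      rw [pv_go_acc sep hsep (rest.length + 1) _ [] [[]]
          (by rw [List.length_drop]; cases sep with
              | nil => exact absurd rfl hsep
              | cons a t => simp only [List.length_cons]; omega)]
      simp
    · rw [pv_splitOn_cons_neg sep hsep c rest (Bool.eq_false_iff.mpr hpre)]
      exact pvMapHd_ne_nil _ _

theorem pv_splitOn_pos (sep : List Char) (hsep : sep ≠ []) (l : List Char)
    (hpre : sep.isPrefixOf l = true) :
    PySem.Chars.splitOn l sep = [] :: PySem.Chars.splitOn (List.drop sep.length l) sep := by
  cases l with
  | nil =>
    exfalso
    have := List.isPrefixOf_iff_prefix.mp hpre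
    simp at this
    exact hsep this
  | cons c rest =>
    simp only [PySem.Chars.splitOn, List.length_cons]
    rw [pv_go_cons, if_pos hpre]
    simp only [List.reverse_nil]
    rw [pv_go_acc sep hsep (rest.length + 1) _ [] [[]]
        (by rw [List.length_drop]; cases sep with
            | nil => exact absurd rfl hsep
            | cons a t => simp only [List.length_cons]; omega)]
    have h := pv_splitOn_ne_nil sep hsep (List.drop sep.length (c :: rest))
    simp only [PySem.Chars.splitOn] at h ⊢
    cases hx : PySem.Chars.splitOn.go sep ((List.drop sep.length (c :: rest)).length + 1)
        (List.drop sep.length (c :: rest)) [] [] with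
    | nil => exact absurd hx h
    | cons y ys => simp [pvMapHd]

theorem pv_find_go_eq (sub : List Char) :
    ∀ l k, PySem.Chars.find.go sub l k =
      if PySem.Chars.find l sub = -1 then -1 else k + PySem.Chars.find l sub := by
  intro l
  induction l with
  | nil =>
    intro k
    by_cases h : sub.isEmpty = true
    · simp [PySem.Chars.find, PySem.Chars.find.go.eq_1, h]
    · simp [PySem.Chars.find, PySem.Chars.find.go.eq_1, h]
  | cons c rest IH =>
    intro k
    by_cases h : sub.isPrefixOf (c :: rest) = true
    · simp [PySem.Chars.find, PySem.Chars.find.go.eq_2, h]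
    · rw [PySem.Chars.find.go.eq_2, if_neg h, IH (k + 1)]
      have hstep : PySem.Chars.find (c :: rest) sub =
          if PySem.Chars.find rest sub = -1 then -1 else 1 + PySem.Chars.find rest sub := by
        rw [show PySem.Chars.find (c :: rest) sub = PySem.Chars.find.go sub (c :: rest) 0 from rfl,
          PySem.Chars.find.go.eq_2, if_neg h, IH 1]
        norm_num
      rw [hstep]
      by_cases h2 : PySem.Chars.find rest sub = -1
      · simp [h2]
      · simp only [if_neg h2]
        rw [if_neg (by
          have hlb := PySem.Chars.neg_one_le_find rest sub
          intro hx
          omega)]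
        push_cast
        ring

-- no occurrence: the split is the whole string in one block
theorem pv_splitOn_of_not_infix (sep : List Char) (hsep : sep ≠ []) (l : List Char)
    (h : ¬ sep <:+: l) : PySem.Chars.splitOn l sep = [l] := by
  induction l with
  | nil => exact pv_splitOn_nil sep
  | cons c rest IH =>
    have hpre : sep.isPrefixOf (c :: rest) = false := by
      rw [Bool.eq_false_iff]
      intro hx
      exact h (List.isPrefixOf_iff_prefix.mp hx).isInfix
    rw [pv_splitOn_cons_neg sep hsep c rest hpre,
      IH (fun hx => h (List.infix_cons hx))]
    simp [pvMapHd]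

-- first occurrence at n = find: the split is (take n) :: split of the rest after the separator
theorem pv_splitOn_of_infix (sep : List Char) (hsep : sep ≠ []) (l : List Char)
    (h : sep <:+: l) :
    PySem.Chars.splitOn l sep =
      List.take (PySem.Chars.find l sep).toNat l ::
        PySem.Chars.splitOn (List.drop ((PySem.Chars.find l sep).toNat + sep.length) l) sep := by
  induction l with
  | nil =>
    exfalso
    exact hsep (List.eq_nil_of_infix_nil h)
  | cons c rest IH =>
    by_cases hpre : sep.isPrefixOf (c :: rest) = true
    · have hf : PySem.Chars.find (c :: rest) sep = 0 := by
        simp [PySem.Chars.find, PySem.Chars.find.go.eq_2, hpre]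
      rw [pv_splitOn_pos sep hsep _ hpre, hf]
      simp
    · have hinf : sep <:+: rest := by
        rcases (List.infix_cons_iff).mp h with hp | hi
        · exact absurd (List.isPrefixOf_iff_prefix.mpr hp) (by simpa using hpre)
        · exact hi
      have hf0 : 0 ≤ PySem.Chars.find rest sep :=
        (PySem.Chars.find_nonneg_iff rest sep).mpr hinf
      have hfne : PySem.Chars.find rest sep ≠ -1 := by omega
      have hf : PySem.Chars.find (c :: rest) sep = 1 + PySem.Chars.find rest sep := by
        rw [show PySem.Chars.find (c :: rest) sep = PySem.Chars.find.go sep (c :: rest) 0 from rfl,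
          PySem.Chars.find.go.eq_2, if_neg hpre, pv_find_go_eq sep rest 1, if_neg hfne]
        norm_num
      have htn : (PySem.Chars.find (c :: rest) sep).toNat =
          (PySem.Chars.find rest sep).toNat + 1 := by
        rw [hf]; omega
      rw [pv_splitOn_cons_neg sep hsep c rest (Bool.eq_false_iff.mpr hpre), IH hinf, htn]
      simp [pvMapHd, List.take_succ_cons, List.drop_succ_cons,
        show (PySem.Chars.find rest sep).toNat + 1 + sep.length
          = ((PySem.Chars.find rest sep).toNat + sep.length) + 1 by omega]

-- B's scanner, generalised over its two accumulators, computes the canonical split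
theorem pv_scanGo_eq (l buf : List Char) (segs : List (List Char)) :
    pvScanGo l buf segs = segs ++ pvMapHd buf (PySem.Chars.splitOn l "Category:".toList) := by
  induction l, buf, segs using pvScanGo.induct with
  | case1 buf segs => simp [pvScanGo, pv_splitOn_nil, pvMapHd]
  | case2 c rest buf segs hpre IH =>
    rw [pvScanGo]
    simp only [if_pos hpre]
    rw [IH, pv_splitOn_pos _ (by decide) _ hpre]
    have hd : List.drop ("Category:".toList).length (c :: rest) = List.drop 8 rest := by
      simp
    rw [hd]
    cases hx : PySem.Chars.splitOn (List.drop 8 rest) "Category:".toList with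
    | nil => exact absurd hx (pv_splitOn_ne_nil _ (by decide) _)
    | cons y ys => simp [pvMapHd]
  | case3 c rest buf segs hpre IH =>
    rw [pvScanGo]
    simp only [if_neg hpre]
    rw [IH, pv_splitOn_cons_neg _ (by decide) c rest (Bool.eq_false_iff.mpr hpre),
      pvMapHd_pvMapHd]

theorem pv_scan_eq (l : List Char) :
    pvScanGo l [] [] = PySem.Chars.splitOn l "Category:".toList := by
  rw [pv_scanGo_eq]
  cases hx : PySem.Chars.splitOn l "Category:".toList with
  | nil => exact absurd hx (pv_splitOn_ne_nil _ (by decide) _)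
  | cons y ys => simp [pvMapHd]

theorem pv_parts (t : String) : (PySem.Str.split? t "Category:").getD [] =
    (PySem.Chars.splitOn t.toList "Category:".toList).map String.ofList := by
  simp [PySem.Str.split?, PySem.Chars.split?]

theorem pv_main (s : String) :
    extract_text_and_categories s = extract_text_and_categories_alt s := by
  have hsep : ("Category:".toList : List Char) ≠ [] := by decide
  by_cases h : PySem.Str.find s "Category:" = -1
  · have hni : ¬ "Category:".toList <:+: s.toList := by
      rw [PySem.Str.find_eq] at h
      exact (PySem.Chars.find_eq_neg_one_iff _ _).mp h
    have hs1 : PySem.Chars.splitOn s.toList "Category:".toList = [s.toList] :=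
      pv_splitOn_of_not_infix _ hsep _ hni
    simp only [extract_text_and_categories, extract_text_and_categories_alt]
    rw [if_pos h, pv_scan_eq, hs1]
    simp [String.ofList_toList]
  · have hfc : PySem.Str.find s "Category:" = PySem.Chars.find s.toList "Category:".toList :=
      PySem.Str.find_eq s _
    have hlb := PySem.Chars.neg_one_le_find s.toList "Category:".toList
    have hge : 0 ≤ PySem.Chars.find s.toList "Category:".toList := by rw [hfc] at h; omega
    set n := (PySem.Chars.find s.toList "Category:".toList).toNat with hn
    have hfn : PySem.Chars.find s.toList "Category:".toList = (n : Int) :=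
      (Int.toNat_of_nonneg hge).symm
    have hinf : "Category:".toList <:+: s.toList := by
      rw [hfc] at h
      exact (PySem.Chars.find_ne_neg_one_iff _ _).mp h
    have hpref : "Category:".toList <+: List.drop n s.toList := (PySem.Chars.find_spec hge).1
    have hpreb : ("Category:".toList).isPrefixOf (List.drop n s.toList) = true :=
      List.isPrefixOf_iff_prefix.mpr hpref
    have hlen9 : ("Category:".toList).length = 9 := by decide
    -- the two slices of A
    have hcl : PySem.Str.slice s none (some (PySem.Str.find s "Category:")) =
        String.ofList (List.take n s.toList) := by
      rw [hfc, hfn, ← String.ofList_toList (s := PySem.Str.slice s none (some (n : Int))),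
        PySem.Str.toList_slice]
      simp [PySem.Chars.slice, PySem.List.slice_to_natCast]
    have hct : PySem.Str.slice s (some (PySem.Str.find s "Category:")) none =
        String.ofList (List.drop n s.toList) := by
      rw [hfc, hfn, ← String.ofList_toList (s := PySem.Str.slice s (some (n : Int)) none),
        PySem.Str.toList_slice]
      simp [PySem.Chars.slice, PySem.List.slice_from_natCast]
    -- A's tail split
    have hsA : PySem.Chars.splitOn (List.drop n s.toList) "Category:".toList =
        [] :: PySem.Chars.splitOn (List.drop (n + 9) s.toList) "Category:".toList := by
      rw [pv_splitOn_pos _ hsep _ hpreb, hlen9, List.drop_drop]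
    -- B's scan of the whole string
    have hsB : pvScanGo s.toList [] [] =
        List.take n s.toList ::
          PySem.Chars.splitOn (List.drop (n + 9) s.toList) "Category:".toList := by
      rw [pv_scan_eq, pv_splitOn_of_infix _ hsep _ hinf, hlen9, ← hn]
    have hofl : String.ofList ([] : List Char) = "" := by decide
    have hstrip : PySem.Str.strip "" = "" := by decide
    simp only [extract_text_and_categories, extract_text_and_categories_alt]
    rw [if_neg h, pv_parts, hcl, hct, String.toList_ofList, hsA, hsB]
    simp [hofl, hstrip]

-- ===== VERDICT (by name: the statement is the Claim_ definition above) =====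
theorem extract_text_and_categories_spec : Claim_equal_extract_text_and_categories := by
  intro s _
  exact pv_main s
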